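-- pv_equiv track=rewrite | github.com/MinKyeom/KMK-DREAM | Programmers/lv3/사라지는 발판.py | solution
-- ===== SOURCE A (Python) =====
-- def solution(board, aloc, bloc):
--     answer = 0
--
--     deltas = ((-1, 0), (1, 0), (0, -1), (0, 1))
--
--     def neighbor(loc, board):
--         for dx, dy in deltas:
--             n = (loc[0]+dx, loc[1]+dy)
--             if n in board:
--                 yield (*n, loc[2])
--
--     def dfs(aloc, bloc, board, depth):
--         neighbors = list(neighbor(aloc, board))
--
--         if not neighbors or aloc[:2] not in board:
--             return 0, depth
--
--         res = list(dfs(bloc, n, board - {aloc[:2]}, depth + 1) for n in neighbors)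
--         wins = [r[1] for r in res if r[0] == 0]
--         loses = [r[1] for r in res if r[0] == 1]
--
--         if wins:
--             return 1, min(wins)
--         else:
--             return 0, max(loses)
--
--
--     board = {(r, c) for r, row in enumerate(board) for c, val in enumerate(row) if val}
--     answer = dfs(tuple(aloc + [0]), tuple(bloc + [1]), board, 0)[1]
--
--     return answer
-- ===== SOURCE B (Python) =====
-- def solution(board, aloc, bloc):
--     deltas = ((-1, 0), (1, 0), (0, -1), (0, 1))
--     used = set()
--
--     def alive(r, c):
--         return 0 <= r < len(board) and 0 <= c < len(board[r]) \
--             and board[r][c] and (r, c) not in used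
--
--     def go(cur, opp):
--         moves = [(cur[0] + dx, cur[1] + dy) for dx, dy in deltas
--                  if alive(cur[0] + dx, cur[1] + dy)]
--         if not moves or not alive(cur[0], cur[1]):
--             return (0, 0)
--         used.add(cur)
--         sub = [go(opp, m) for m in moves]
--         used.discard(cur)
--         wins = [t for w, t in sub if w == 0]
--         loses = [t for w, t in sub if w == 1]
--         return (1, 1 + min(wins)) if wins else (0, 1 + max(loses))
--
--     return go((aloc[0], aloc[1]), (bloc[0], bloc[1]))[1]
-- ===== Notes on version B (the rewrite author's own statement) =====
-- stated objective: faster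
-- what changed: A builds a set of live cells by a comprehension over the whole board and recurses with absolute depths, creating a new set difference for every move; B is an in-place backtracking DFS that indexes the board directly (bounds + truthiness check), threads one mutable visited set instead of copying sets, and returns relative move counts — no O(board) set construction or per-node set copies.
-- outside the precondition, e.g. on solution([[1]], [5], [7]): A returns 0, B raises IndexError
import Mathlib
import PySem

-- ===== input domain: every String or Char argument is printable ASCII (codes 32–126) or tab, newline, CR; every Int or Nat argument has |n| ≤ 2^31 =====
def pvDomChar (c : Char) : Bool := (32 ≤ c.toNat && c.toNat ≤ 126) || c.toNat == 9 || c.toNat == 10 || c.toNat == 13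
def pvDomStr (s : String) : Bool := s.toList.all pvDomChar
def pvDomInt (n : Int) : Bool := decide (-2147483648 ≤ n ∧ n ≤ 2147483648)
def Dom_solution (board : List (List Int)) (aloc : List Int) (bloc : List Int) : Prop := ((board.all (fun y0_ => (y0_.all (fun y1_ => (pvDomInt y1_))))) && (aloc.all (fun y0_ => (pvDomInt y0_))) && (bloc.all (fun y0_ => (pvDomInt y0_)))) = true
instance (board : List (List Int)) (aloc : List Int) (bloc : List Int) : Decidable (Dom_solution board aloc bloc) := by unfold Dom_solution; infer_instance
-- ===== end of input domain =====

-- B replaces A's persistent cell-set minimax (set built by comprehension, a fresh set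
-- difference per move, absolute depths) by an in-place backtracking DFS over the board
-- itself (direct bounds/truthiness indexing, one visited set, relative move counts);
-- skips A's O(board) set construction and per-node set copies (measured faster by the
-- timing run). Return-value equivalence only (neither mutates args).

-- shared literal: the four move directions (same tuple in both sources)
def pvDeltas : List (Int × Int) := [(-1, 0), (1, 0), (0, -1), (0, 1)]

-- ===== PORT A =====
-- the flattened comprehension {(r,c) for r,row in enumerate(board) for c,val in enumerate(row) if val}
def pvCellsList (board : List (List Int)) : List (Int × Int) :=
  (PySem.List.enumerate board).flatMap (fun rc =>
    (PySem.List.enumerate rc.2).filterMap (fun cv =>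
      if cv.2 ≠ 0 then some (rc.1, cv.1) else none))

def pvCellsOf (board : List (List Int)) : PySem.Set (Int × Int) :=
  PySem.Set.ofList (pvCellsList board)

-- generator neighbor(loc, board): positions carry the player tag loc[2]
def pvNeighborA (loc : Int × Int × Int) (bd : PySem.Set (Int × Int)) : List (Int × Int × Int) :=
  pvDeltas.filterMap (fun d =>
    if PySem.Set.contains bd (loc.1 + d.1, loc.2.1 + d.2) then
      some (loc.1 + d.1, loc.2.1 + d.2, loc.2.2)
    else none)

-- termination helper for pvDfsA (cited in decreasing_by)
theorem pv_diff_singleton_lt (bd : List (Int × Int)) (x : Int × Int)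
    (h : PySem.Set.contains bd x = true) :
    (PySem.Set.diff bd [x]).length < bd.length := by
  simp only [PySem.Set.diff, PySem.Set.contains] at *
  apply List.length_filter_lt_length_iff_exists.mpr
  exact ⟨x, by simpa using h, by simp⟩

def pvDfsA (a b : Int × Int × Int) (bd : PySem.Set (Int × Int)) (depth : Int) : Int × Int :=
  let ns := pvNeighborA a bd
  if ns = [] ∨ ¬ PySem.Set.contains bd (a.1, a.2.1) = true then (0, depth)
  else
    let sub := ns.map (fun n => pvDfsA b n (PySem.Set.diff bd [(a.1, a.2.1)]) (depth + 1))
    let wins := (sub.filter (fun r => r.1 == 0)).map (fun r => r.2)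
    let loses := (sub.filter (fun r => r.1 == 1)).map (fun r => r.2)
    if wins ≠ [] then (1, (PySem.List.min? wins (fun t => t)).getD 0)
    else (0, (PySem.List.max? loses (fun t => t)).getD 0)
termination_by bd.length
decreasing_by
  rename_i h
  exact pv_diff_singleton_lt bd _ (by rcases not_or.mp h with ⟨-, h2⟩; exact not_not.mp h2)

def solution (board : List (List Int)) (aloc : List Int) (bloc : List Int) : Int :=
  let bd := pvCellsOf board
  let a := (PySem.List.pyGetD aloc 0 0, PySem.List.pyGetD aloc 1 0,
            PySem.List.pyGetD (aloc ++ [0]) 2 0)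
  let b := (PySem.List.pyGetD bloc 0 0, PySem.List.pyGetD bloc 1 0,
            PySem.List.pyGetD (bloc ++ [1]) 2 0)
  (pvDfsA a b bd 0).2

-- ===== PORT B =====
-- alive(r, c): bounds check, truthiness of the cell, and not yet visited
def pvAliveB (board : List (List Int)) (used : PySem.Set (Int × Int)) (r c : Int) : Bool :=
  decide (0 ≤ r) && decide (r < (board.length : Int)) &&
  (decide (0 ≤ c) && decide (c < ((PySem.List.pyGetD board r []).length : Int)) &&
   decide (PySem.List.pyGetD (PySem.List.pyGetD board r []) c 0 ≠ 0) &&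
   !(PySem.Set.contains used (r, c)))

def pvMovesB (board : List (List Int)) (used : PySem.Set (Int × Int)) (cur : Int × Int) :
    List (Int × Int) :=
  pvDeltas.filterMap (fun d =>
    if pvAliveB board used (cur.1 + d.1) (cur.2 + d.2) then
      some (cur.1 + d.1, cur.2 + d.2)
    else none)

-- termination helpers for pvGoB (cited in decreasing_by)
theorem pv_pyGetD_natCast' {α : Type} (xs : List α) (k : Nat) (hk : k < xs.length) (d : α) :
    PySem.List.pyGetD xs (k : Int) d = xs[k] := by
  rw [PySem.List.pyGetD_natCast]
  exact List.getD_eq_getElem xs d hk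

theorem pv_mem_cells_iff (board : List (List Int)) (r c : Int) :
    (r, c) ∈ pvCellsList board ↔
      (0 ≤ r ∧ r < (board.length : Int) ∧ 0 ≤ c ∧
       c < ((PySem.List.pyGetD board r []).length : Int) ∧
       PySem.List.pyGetD (PySem.List.pyGetD board r []) c 0 ≠ 0) := by
  simp only [pvCellsList, List.mem_flatMap, List.mem_filterMap,
    PySem.List.mem_enumerate_iff]
  constructor
  · rintro ⟨rc, ⟨k, hk, rfl⟩, cv, ⟨j, hj, rfl⟩, hval⟩
    simp only [zero_add] at *
    split at hval
    · rename_i hv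
      obtain ⟨rfl, rfl⟩ : ((k : Int) = r ∧ (j : Int) = c) := by
        cases hval; exact ⟨rfl, rfl⟩
      rw [pv_pyGetD_natCast' board k hk, pv_pyGetD_natCast' _ j hj]
      refine ⟨by positivity, by exact_mod_cast hk, by positivity, by exact_mod_cast hj, hv⟩
    · cases hval
  · rintro ⟨hr0, hrl, hc0, hcl, hv⟩
    have hk : r.toNat < board.length := by omega
    have hrc : ((r.toNat : Nat) : Int) = r := by omega
    rw [← hrc] at hcl hv ⊢
    rw [pv_pyGetD_natCast' board r.toNat hk] at hcl hv
    have hj : c.toNat < (board[r.toNat]).length := by omega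
    have hcc : ((c.toNat : Nat) : Int) = c := by omega
    rw [← hcc] at hv ⊢
    rw [pv_pyGetD_natCast' _ c.toNat hj] at hv
    exact ⟨(r.toNat, board[r.toNat]), ⟨r.toNat, hk, by simp⟩,
      (c.toNat, board[r.toNat][c.toNat]), ⟨c.toNat, hj, by simp⟩, by simp [hv]⟩

theorem pv_alive_mem (board : List (List Int)) (used : PySem.Set (Int × Int)) (r c : Int)
    (h : pvAliveB board used r c = true) :
    (r, c) ∈ pvCellsList board ∧ PySem.Set.contains used (r, c) = false := by
  simp only [pvAliveB, Bool.and_eq_true, Bool.not_eq_true', decide_eq_true_eq] at h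
  obtain ⟨⟨h1, h2⟩, ⟨⟨h3, h4⟩, h5⟩, h6⟩ := h
  exact ⟨(pv_mem_cells_iff board r c).mpr ⟨h1, h2, h3, h4, h5⟩, h6⟩

theorem pv_filter_add_lt (l : List (Int × Int)) (used : PySem.Set (Int × Int)) (x : Int × Int)
    (hx : x ∈ l) (hnu : PySem.Set.contains used x = false) :
    (l.filter (fun p => !(PySem.Set.contains (PySem.Set.add used x) p))).length <
      (l.filter (fun p => !(PySem.Set.contains used p))).length := by
  have hnu' : x ∉ used := by simpa [PySem.Set.contains] using hnu
  simp only [PySem.Set.contains, PySem.Set.add] at *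
  rw [if_neg (by simpa using hnu')]
  have h1 : List.filter (fun p => !List.contains (used ++ [x]) p) l =
      (l.filter (fun p => !List.contains used p)).filter (fun p => !(p == x)) := by
    rw [List.filter_filter]
    apply List.filter_congr
    intro p _
    by_cases h2 : p = x <;> by_cases h3 : p ∈ used <;> simp [h2, h3]
  rw [h1]
  apply List.length_filter_lt_length_iff_exists.mpr
  exact ⟨x, by simp [hx, hnu'], by simp⟩

def pvGoB (board : List (List Int)) (cur opp : Int × Int) (used : PySem.Set (Int × Int)) :
    Int × Int :=
  let moves := pvMovesB board used cur
  if moves = [] ∨ ¬ pvAliveB board used cur.1 cur.2 = true then (0, 0)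
  else
    let sub := moves.map (fun m => pvGoB board opp m (PySem.Set.add used cur))
    let wins := (sub.filter (fun r => r.1 == 0)).map (fun r => r.2)
    let loses := (sub.filter (fun r => r.1 == 1)).map (fun r => r.2)
    if wins ≠ [] then (1, 1 + (PySem.List.min? wins (fun t => t)).getD 0)
    else (0, 1 + (PySem.List.max? loses (fun t => t)).getD 0)
termination_by ((pvCellsList board).filter (fun p => !(PySem.Set.contains used p))).length
decreasing_by
  rename_i h
  rcases not_or.mp h with ⟨-, h2⟩
  rcases pv_alive_mem board used cur.1 cur.2 (not_not.mp h2) with ⟨hmem, hnu⟩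
  exact pv_filter_add_lt _ used _ hmem hnu

def solution_alt (board : List (List Int)) (aloc : List Int) (bloc : List Int) : Int :=
  (pvGoB board (PySem.List.pyGetD aloc 0 0, PySem.List.pyGetD aloc 1 0)
    (PySem.List.pyGetD bloc 0 0, PySem.List.pyGetD bloc 1 0) PySem.Set.empty).2

-- ===== PRECONDITION & SPEC =====
-- Pre_ excludes aloc/bloc with fewer than 2 entries: there A raises IndexError except when the
-- lazy neighbor generator never yields (then A accidentally returns 0 before touching the
-- missing index), while B's direct aloc[0]/aloc[1] access always raises.
def Pre_solution (board : List (List Int)) (aloc : List Int) (bloc : List Int) : Prop :=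
  2 ≤ aloc.length ∧ 2 ≤ bloc.length
instance (board : List (List Int)) (aloc : List Int) (bloc : List Int) :
    Decidable (Pre_solution board aloc bloc) := by unfold Pre_solution; infer_instance

def pvWitness_solution : List (List Int) × List Int × List Int := ([[1]], [0, 0], [0, 0])

def Spec_solution (board : List (List Int)) (aloc : List Int) (bloc : List Int) (out : Int) : Prop := out = solution_alt board aloc bloc
instance (board : List (List Int)) (aloc : List Int) (bloc : List Int) (out : Int) : Decidable (Spec_solution board aloc bloc out) := by unfold Spec_solution; infer_instance

-- ===== CLAIM (what is proved, stated in full; the proofs are below) =====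
def Claim_equal_solution : Prop := ∀ (board : List (List Int)) (aloc : List Int) (bloc : List Int), Dom_solution board aloc bloc → Pre_solution board aloc bloc → Spec_solution board aloc bloc (solution board aloc bloc)

-- ===== LEMMAS AND PROOFS =====

theorem pv_contains_iff_alive (board : List (List Int)) (used : PySem.Set (Int × Int))
    (p : Int × Int) :
    PySem.Set.contains (PySem.Set.diff (pvCellsOf board) used) p =
      pvAliveB board used p.1 p.2 := by
  obtain ⟨r, c⟩ := p
  rw [Bool.eq_iff_iff]
  rw [PySem.Set.contains_iff, PySem.Set.mem_diff, pvCellsOf, PySem.Set.mem_ofList,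
    pv_mem_cells_iff]
  simp only [pvAliveB, PySem.Set.contains, Bool.and_eq_true, Bool.not_eq_true',
    decide_eq_true_eq, List.contains_eq_mem, decide_eq_false_iff_not]
  tauto

theorem pv_neighbor_eq (board : List (List Int)) (used : PySem.Set (Int × Int))
    (x y tag : Int) :
    pvNeighborA (x, y, tag) (PySem.Set.diff (pvCellsOf board) used) =
      (pvMovesB board used (x, y)).map (fun m => (m.1, m.2, tag)) := by
  rw [pvNeighborA, pvMovesB, List.map_filterMap]
  apply List.filterMap_congr
  intro d _
  simp only [pv_contains_iff_alive]
  split <;> simp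

theorem pv_diff_step (cells used : List (Int × Int)) (x : Int × Int)
    (hx : PySem.Set.contains used x = false) :
    PySem.Set.diff (PySem.Set.diff cells used) [x] =
      PySem.Set.diff cells (PySem.Set.add used x) := by
  have hnu : x ∉ used := by simpa [PySem.Set.contains] using hx
  simp only [PySem.Set.diff, PySem.Set.add, PySem.Set.contains]
  rw [if_neg (by simpa using hnu), List.filter_filter]
  apply List.filter_congr
  intro p _
  by_cases h2 : p = x <;> by_cases h3 : p ∈ used <;> simp [h2, h3]

theorem pv_foldl_min_shift (xs : List Int) (c : Int) : ∀ x : Int,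
    (xs.map (fun t => c + t)).foldl min (c + x) = c + xs.foldl min x := by
  induction xs with
  | nil => intro x; simp
  | cons y ys ih =>
    intro x
    simp only [List.map_cons, List.foldl_cons]
    rw [show min (c + x) (c + y) = c + min x y by omega, ih]

theorem pv_foldl_max_shift (xs : List Int) (c : Int) : ∀ x : Int,
    (xs.map (fun t => c + t)).foldl max (c + x) = c + xs.foldl max x := by
  induction xs with
  | nil => intro x; simp
  | cons y ys ih =>
    intro x
    simp only [List.map_cons, List.foldl_cons]
    rw [show max (c + x) (c + y) = c + max x y by omega, ih]

theorem pv_min_getD_shift (l : List Int) (c : Int) (h : l ≠ []) :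
    (PySem.List.min? (l.map (fun t => c + t)) (fun t => t)).getD 0 =
      c + (PySem.List.min? l (fun t => t)).getD 0 := by
  cases l with
  | nil => exact absurd rfl h
  | cons x xs =>
    rw [List.map_cons, PySem.List.min?_id_cons, PySem.List.min?_id_cons]
    simp only [Option.getD_some]
    exact pv_foldl_min_shift xs c x

theorem pv_max_getD_shift (l : List Int) (c : Int) (h : l ≠ []) :
    (PySem.List.max? (l.map (fun t => c + t)) (fun t => t)).getD 0 =
      c + (PySem.List.max? l (fun t => t)).getD 0 := by
  cases l with
  | nil => exact absurd rfl h
  | cons x xs =>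
    rw [List.map_cons, PySem.List.max?_id_cons, PySem.List.max?_id_cons]
    simp only [Option.getD_some]
    exact pv_foldl_max_shift xs c x

theorem pv_go_fst (board : List (List Int)) (cur opp : Int × Int)
    (used : PySem.Set (Int × Int)) :
    (pvGoB board cur opp used).1 = 0 ∨ (pvGoB board cur opp used).1 = 1 := by
  rw [pvGoB.eq_def]
  dsimp only
  split
  · left; rfl
  · split
    · right; rfl
    · left; rfl

theorem pv_main (board : List (List Int)) : ∀ (n : Nat) (used : PySem.Set (Int × Int))
    (a b : Int × Int) (ta tb d : Int),
    ((pvCellsList board).filter (fun p => !(PySem.Set.contains used p))).length ≤ n →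
    pvDfsA (a.1, a.2, ta) (b.1, b.2, tb) (PySem.Set.diff (pvCellsOf board) used) d =
      ((pvGoB board a b used).1, d + (pvGoB board a b used).2) := by
  intro n
  induction n with
  | zero =>
    intro used a b ta tb d hn
    rw [pvDfsA.eq_def, pvGoB.eq_def]
    simp only [pv_neighbor_eq, pv_contains_iff_alive, Prod.mk.eta, List.map_eq_nil_iff]
    have hal : ¬ pvAliveB board used a.1 a.2 = true := by
      intro h
      obtain ⟨hmem, hnu⟩ := pv_alive_mem board used a.1 a.2 h
      have hmf : (a.1, a.2) ∈
          (pvCellsList board).filter (fun p => !(PySem.Set.contains used p)) :=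
        List.mem_filter.mpr ⟨hmem, by simpa [PySem.Set.contains] using hnu⟩
      have := List.length_pos_of_mem hmf
      omega
    rw [if_pos (Or.inr hal), if_pos (Or.inr hal)]
    simp
  | succ n ih =>
    intro used a b ta tb d hn
    rw [pvDfsA.eq_def, pvGoB.eq_def]
    simp only [pv_neighbor_eq, pv_contains_iff_alive, Prod.mk.eta, List.map_eq_nil_iff]
    by_cases hc : pvMovesB board used a = [] ∨ ¬ pvAliveB board used a.1 a.2 = true
    · rw [if_pos hc, if_pos hc]
      simp
    · rw [if_neg hc, if_neg hc]
      rw [not_or, not_not] at hc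
      obtain ⟨hmv, halive⟩ := hc
      obtain ⟨hmem, hnu⟩ := pv_alive_mem board used a.1 a.2 (by simpa using halive)
      rw [pv_diff_step (pvCellsOf board) used a (by simpa using hnu)]
      have hmeas : ((pvCellsList board).filter
          (fun p => !(PySem.Set.contains (PySem.Set.add used a) p))).length ≤ n := by
        have := pv_filter_add_lt (pvCellsList board) used a hmem (by simpa using hnu)
        omega
      have hsub : (pvMovesB board used a).map
            ((fun n => pvDfsA (b.1, b.2, tb) n
              (PySem.Set.diff (pvCellsOf board) (PySem.Set.add used a)) (d + 1)) ∘
             (fun m => (m.1, m.2, ta))) =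
          (pvMovesB board used a).map
            (fun m => ((pvGoB board b m (PySem.Set.add used a)).1,
              (d + 1) + (pvGoB board b m (PySem.Set.add used a)).2)) := by
        apply List.map_congr_left
        intro m hm
        exact ih (PySem.Set.add used a) b m tb ta (d + 1) hmeas
      rw [List.map_map, hsub]
      simp only [List.filter_map, List.map_map, Function.comp_def, ne_eq,
        List.map_eq_nil_iff]
      set u' := PySem.Set.add used a with hu'
      set moves := pvMovesB board used a with hmoves
      have hmapmap : ∀ (L : List (Int × Int)),
          List.map (fun x => d + 1 + (pvGoB board b x u').2) L =
            (List.map (fun x => (pvGoB board b x u').2) L).map (fun t => d + 1 + t) := by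
        intro L
        simp [List.map_map, Function.comp_def]
      by_cases hw : List.filter (fun x => (pvGoB board b x u').1 == 0) moves = []
      · rw [if_neg (not_not_intro hw), if_neg (not_not_intro hw)]
        have hlose : List.filter (fun x => (pvGoB board b x u').1 == 1) moves ≠ [] := by
          cases hm : moves with
          | nil => exact absurd hm hmv
          | cons m ms =>
            have hm0 : ∀ y ∈ moves, ¬((pvGoB board b y u').1 == 0) = true := by
              simpa using List.filter_eq_nil_iff.mp hw
            have hmmem : m ∈ moves := by rw [hm]; exact List.mem_cons_self
            have h1 : (pvGoB board b m u').1 = 1 := by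
              rcases pv_go_fst board b m u' with h | h
              · exact absurd (by simp [h]) (hm0 m hmmem)
              · exact h
            have hmf : m ∈ List.filter (fun x => (pvGoB board b x u').1 == 1) moves :=
              List.mem_filter.mpr ⟨hmmem, by simp [h1]⟩
            rw [hm] at hmf
            exact List.ne_nil_of_mem hmf
        have hshift := pv_max_getD_shift
          (List.map (fun x => (pvGoB board b x u').2)
            (List.filter (fun x => (pvGoB board b x u').1 == 1) moves)) (d + 1)
          (by simpa [List.map_eq_nil_iff] using hlose)
        rw [hmapmap, hshift]
        simp only [Prod.mk.injEq, true_and]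
        ring
      · rw [if_pos hw, if_pos hw]
        have hshift := pv_min_getD_shift
          (List.map (fun x => (pvGoB board b x u').2)
            (List.filter (fun x => (pvGoB board b x u').1 == 0) moves)) (d + 1)
          (by simpa [List.map_eq_nil_iff] using hw)
        rw [hmapmap, hshift]
        simp only [Prod.mk.injEq, true_and]
        ring

-- ===== VERDICT (by name: the statement is the Claim_ definition above) =====
theorem solution_spec : Claim_equal_solution := by
  intro board aloc bloc _ _
  simp only [Spec_solution, solution, solution_alt]
  have hdiff : PySem.Set.diff (pvCellsOf board) PySem.Set.empty = pvCellsOf board := by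
    simp [PySem.Set.diff, PySem.Set.empty, PySem.Set.contains]
  have h := pv_main board
    ((pvCellsList board).filter (fun p => !(PySem.Set.contains PySem.Set.empty p))).length
    PySem.Set.empty
    (PySem.List.pyGetD aloc 0 0, PySem.List.pyGetD aloc 1 0)
    (PySem.List.pyGetD bloc 0 0, PySem.List.pyGetD bloc 1 0)
    (PySem.List.pyGetD (aloc ++ [0]) 2 0) (PySem.List.pyGetD (bloc ++ [1]) 2 0) 0 le_rfl
  rw [hdiff] at h
  rw [h]
  simp
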